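-- pv_equiv track=rewrite | github.com/broadinstitute/gatk-sv | module19_LR_benchmark/scripts/count_trio_genotype_patterns.py | normalize_gt
-- ===== SOURCE A (Python) =====
-- def normalize_gt(sample_field):
--     gt = sample_field.split(':', 1)[0].replace('|', '/')
--     if gt in {'.', './.', '.|.'}:
--         return './.'
--
--     alleles = gt.split('/')
--     if len(alleles) != 2:
--         return gt
--
--     if '.' in alleles:
--         non_missing = sorted([allele for allele in alleles if allele != '.'])
--         missing = ['.'] * alleles.count('.')
--         return '/'.join(non_missing + missing)
--
--     try:
--         return '/'.join(sorted(alleles, key=lambda allele: int(allele)))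
--     except ValueError:
--         return '/'.join(sorted(alleles))
-- ===== SOURCE B (Python) =====
-- def _should_swap(a, b):
--     if a == '.':
--         return True
--     if b == '.':
--         return False
--     try:
--         return int(b) < int(a)
--     except ValueError:
--         return b < a
--
--
-- def normalize_gt(sample_field):
--     gt = sample_field.split(':', 1)[0].replace('|', '/')
--     if gt in {'.', './.', '.|.'}:
--         return './.'
--
--     alleles = gt.split('/')
--     if len(alleles) != 2:
--         return gt
--
--     a, b = alleles
--     if _should_swap(a, b):
--         a, b = b, a
--     return '/'.join((a, b))
-- ===== Notes on version B (the rewrite author's own statement) =====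
-- stated objective: simpler
-- what changed: Instead of building and sorting lists (filter+sort+count for the missing case, two sorted() calls for numeric/string), B decides with one pairwise predicate whether the two alleles must be swapped and joins them directly.
import Mathlib
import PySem

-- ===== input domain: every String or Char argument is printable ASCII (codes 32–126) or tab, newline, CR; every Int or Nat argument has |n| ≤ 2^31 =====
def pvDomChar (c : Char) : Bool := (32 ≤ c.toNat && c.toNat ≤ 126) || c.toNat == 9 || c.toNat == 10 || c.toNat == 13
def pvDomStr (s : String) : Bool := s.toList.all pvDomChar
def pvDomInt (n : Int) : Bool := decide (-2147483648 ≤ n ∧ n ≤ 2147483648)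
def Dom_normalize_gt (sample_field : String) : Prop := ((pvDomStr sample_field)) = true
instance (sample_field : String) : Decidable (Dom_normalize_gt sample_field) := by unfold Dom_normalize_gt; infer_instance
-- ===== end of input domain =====

-- B replaces A's three list-sorting branches by one pairwise swap predicate on the two alleles (objective: simpler).

-- ===== PORT A =====
def normalize_gt (sample_field : String) : String :=
  -- gt = sample_field.split(':', 1)[0].replace('|', '/')  ([0] of a split result is always present)
  let gt := PySem.Str.replace (((PySem.Str.splitMax? sample_field ":" 1).getD []).headD "") "|" "/"
  if gt == "." || gt == "./." || gt == ".|." then "./."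
  else
    let alleles := (PySem.Str.split? gt "/").getD []
    if alleles.length ≠ 2 then gt
    else if alleles.contains "." then
      let non_missing := PySem.List.sorted (alleles.filter (fun x => x != ".")) (fun x => x) false
      let missing := List.replicate (PySem.List.count alleles ".") "."
      PySem.Str.join "/" (non_missing ++ missing)
    -- try: sorted(key=int) succeeds iff every allele parses; except ValueError: plain string sort
    else if alleles.all (fun a => (PySem.Int.ofStr? a).isSome) then
      PySem.Str.join "/" (PySem.List.sorted alleles (fun a => (PySem.Int.ofStr? a).getD 0) false)
    else
      PySem.Str.join "/" (PySem.List.sorted alleles (fun x => x) false)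

-- ===== PORT B =====
def pvShouldSwap (a b : String) : Bool :=
  if a == "." then true
  else if b == "." then false
  else
    -- try: int(b) < int(a); except ValueError (either fails to parse): b < a
    match PySem.Int.ofStr? a, PySem.Int.ofStr? b with
    | some x, some y => decide (y < x)
    | _, _ => decide (b < a)

def normalize_gt_alt (sample_field : String) : String :=
  let gt := PySem.Str.replace (((PySem.Str.splitMax? sample_field ":" 1).getD []).headD "") "|" "/"
  if gt == "." || gt == "./." || gt == ".|." then "./."
  else
    let alleles := (PySem.Str.split? gt "/").getD []
    match alleles with
    | [a, b] =>
      if pvShouldSwap a b then PySem.Str.join "/" [b, a] else PySem.Str.join "/" [a, b]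
    | _ => gt

-- ===== PRECONDITION & SPEC =====
def Spec_normalize_gt (sample_field : String) (out : String) : Prop := out = normalize_gt_alt sample_field
instance (sample_field : String) (out : String) : Decidable (Spec_normalize_gt sample_field out) := by unfold Spec_normalize_gt; infer_instance

-- ===== CLAIM (what is proved, stated in full; the proofs are below) =====
def Claim_equal_normalize_gt : Prop := ∀ (sample_field : String), Dom_normalize_gt sample_field → Spec_normalize_gt sample_field (normalize_gt sample_field)

-- ===== LEMMAS AND PROOFS =====

-- sorted of a two-element list is a single conditional swap
theorem sorted_pair {κ : Type} [LinearOrder κ] (a b : String) (key : String → κ) :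
    PySem.List.sorted [a, b] key false =
      if key b < key a then [b, a] else [a, b] := by
  simp [PySem.List.sorted, PySem.List.insertBy]

theorem sorted_single {κ : Type} [LinearOrder κ] (a : String) (key : String → κ) :
    PySem.List.sorted [a] key false = [a] := by
  simp [PySem.List.sorted, PySem.List.insertBy]

theorem pair_case (a b : String) :
    (if ([a, b] : List String).contains "." then
      PySem.Str.join "/"
        (PySem.List.sorted (([a, b] : List String).filter (fun x => x != ".")) (fun x => x) false ++
          List.replicate (PySem.List.count ([a, b] : List String) ".") ".")
    else if ([a, b] : List String).all (fun x => (PySem.Int.ofStr? x).isSome) then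
      PySem.Str.join "/" (PySem.List.sorted [a, b] (fun x => (PySem.Int.ofStr? x).getD 0) false)
    else
      PySem.Str.join "/" (PySem.List.sorted [a, b] (fun x => x) false)) =
    (if pvShouldSwap a b then PySem.Str.join "/" [b, a] else PySem.Str.join "/" [a, b]) := by
  by_cases ha : a = "."
  · by_cases hb : b = "." <;>
      simp [pvShouldSwap, ha, hb, PySem.List.count, PySem.List.sorted, PySem.List.insertBy]
  · by_cases hb : b = "."
    · simp [pvShouldSwap, ha, hb, sorted_single, PySem.List.count]
    · have ha' : ¬("." = a) := fun h => ha h.symm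
      have hb' : ¬("." = b) := fun h => hb h.symm
      rcases hxa : PySem.Int.ofStr? a with _ | x <;> rcases hxb : PySem.Int.ofStr? b with _ | y <;>
        simp [pvShouldSwap, ha, hb, ha', hb', hxa, hxb, sorted_pair] <;>
        split_ifs <;> rfl

-- ===== VERDICT (by name: the statement is the Claim_ definition above) =====
theorem normalize_gt_spec : Claim_equal_normalize_gt := by
  intro s _
  unfold Spec_normalize_gt normalize_gt normalize_gt_alt
  generalize PySem.Str.replace (((PySem.Str.splitMax? s ":" 1).getD []).headD "") "|" "/" = gt
  by_cases hguard : (gt == "." || gt == "./." || gt == ".|.") = true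
  · simp [hguard]
  · simp only [Bool.not_eq_true] at hguard
    simp only [hguard, Bool.false_eq_true, if_false]
    generalize (PySem.Str.split? gt "/").getD [] = alleles
    match alleles with
    | [] => simp
    | [a] => simp
    | [a, b] => simpa using pair_case a b
    | a :: b :: c :: t => simp
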